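-- pv_equiv track=rewrite | github.com/NicolasTrocc/Projeto_2-Dessoft | funcoes.py | calcula_pontos_sequencia_baixa
-- ===== SOURCE A (Python) =====
-- def calcula_pontos_sequencia_baixa(numeros):
--     pontos = 0
--     #Deixa a lista crescente
--     lista = []
--     maxi = 0
--     for i in range(len(numeros)):
--         if numeros[i]>maxi:
--             maxi = numeros[i]
--     for i in range(len(numeros)):
--         menor = maxi
--         for p in range(len(numeros)):
--             if numeros[p]<=menor:
--                 menor = numeros[p]
--                 indice = p
--         del numeros[indice]
--         if menor not in lista:
--             lista.append(menor)
--     #verifica se tem sequencia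
--     sequencia = 1
--     for v in range(len(lista)-1):
--         if lista[v+1] == lista[v]+1:
--             sequencia += 1
--         else:
--             break
--     if sequencia >= 4:
--         pontos = 15
--     return pontos
-- ===== SOURCE B (Python) =====
-- def calcula_pontos_sequencia_baixa(numeros):
--     # Note: A empties the input list in place; B does not mutate it (return value is the same).
--     s = sorted(set(numeros))
--     run = 1
--     for a, b in zip(s, s[1:]):
--         if b == a + 1:
--             run += 1
--         else:
--             break
--     return 15 if run >= 4 else 0
-- ===== Notes on version B (the rewrite author's own statement) =====
-- stated objective: faster
-- what changed: A repeatedly scans the whole list to extract the minimum (selection sort with deletion, O(n^2)); B sorts the distinct values once with sorted(set(...)) and scans the consecutive run from the smallest, O(n log n); B also does not mutate the input list (A empties it in place).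
import Mathlib
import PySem

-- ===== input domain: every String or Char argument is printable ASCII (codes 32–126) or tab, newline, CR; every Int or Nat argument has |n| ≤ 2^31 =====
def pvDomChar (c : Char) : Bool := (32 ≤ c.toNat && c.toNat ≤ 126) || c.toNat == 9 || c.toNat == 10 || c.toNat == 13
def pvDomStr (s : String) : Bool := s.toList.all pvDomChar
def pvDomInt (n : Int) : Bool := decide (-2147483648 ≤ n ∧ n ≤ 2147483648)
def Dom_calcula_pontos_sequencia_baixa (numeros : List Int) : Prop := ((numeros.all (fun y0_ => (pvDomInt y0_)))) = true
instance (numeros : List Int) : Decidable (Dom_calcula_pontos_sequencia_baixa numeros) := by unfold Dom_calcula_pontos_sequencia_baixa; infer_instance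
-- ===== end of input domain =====

-- B replaces A's repeated minimum-extraction (O(n^2)) by one sorted(set(...)) pass (O(n log n)).
-- Equivalence is about the RETURN value only: the Python A empties its input list in place, B does not.

-- ===== PORT A =====
-- inner loop: "menor = maxi; for p in range(len(numeros)): if numeros[p] <= menor: menor = numeros[p]; indice = p"
-- state is (menor, indice); indice starts unbound, modelled as Option (none = unbound)
def pvInner : List Int → Nat → Int × Option Nat → Int × Option Nat
  | [], _, st => st
  | x :: xs, p, st => pvInner xs (p + 1) (if x ≤ st.1 then (x, some p) else st)

-- one iteration of the outer loop: pick (menor, indice), del numeros[indice], append menor to lista if new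
def pvSelStep (maxi : Int) (st : List Int × List Int) : List Int × List Int :=
  let r := pvInner st.1 0 (maxi, none)
  match r.2 with
  | none => st  -- unreachable when the list is nonempty: maxi ≥ every element, so the branch fires
  | some idx =>
      (st.1.eraseIdx idx, if r.1 ∈ st.2 then st.2 else st.2 ++ [r.1])

-- "for i in range(len(numeros)):" — the range is computed once, so the loop runs exactly n times
def pvOuter (maxi : Int) : Nat → List Int × List Int → List Int × List Int
  | 0, st => st
  | n + 1, st => pvOuter maxi n (pvSelStep maxi st)

-- "for v in range(len(lista)-1): if lista[v+1] == lista[v]+1: sequencia += 1 else: break"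
def pvSeq : List Int → Int → Int
  | a :: b :: rest, s => if b = a + 1 then pvSeq (b :: rest) (s + 1) else s
  | _, s => s

def calcula_pontos_sequencia_baixa (numeros : List Int) : Int :=
  let maxi := numeros.foldl (fun m x => if x > m then x else m) 0
  let st := pvOuter maxi numeros.length (numeros, [])
  let sequencia := pvSeq st.2 1
  if sequencia ≥ 4 then 15 else 0

-- ===== PORT B =====
-- "run = 1; for a, b in zip(s, s[1:]): if b == a + 1: run += 1 else: break"
def pvRun : List (Int × Int) → Int → Int
  | [], r => r
  | (a, b) :: rest, r => if b = a + 1 then pvRun rest (r + 1) else r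

def calcula_pontos_sequencia_baixa_alt (numeros : List Int) : Int :=
  let s := PySem.List.sorted (PySem.Set.ofList numeros) (fun x => x) false
  let run := pvRun (s.zip s.tail) 1
  if run ≥ 4 then 15 else 0

-- ===== PRECONDITION & SPEC =====
def Spec_calcula_pontos_sequencia_baixa (numeros : List Int) (out : Int) : Prop := out = calcula_pontos_sequencia_baixa_alt numeros
instance (numeros : List Int) (out : Int) : Decidable (Spec_calcula_pontos_sequencia_baixa numeros out) := by unfold Spec_calcula_pontos_sequencia_baixa; infer_instance

-- ===== CLAIM (what is proved, stated in full; the proofs are below) =====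
def Claim_equal_calcula_pontos_sequencia_baixa : Prop := ∀ (numeros : List Int), Dom_calcula_pontos_sequencia_baixa numeros → Spec_calcula_pontos_sequencia_baixa numeros (calcula_pontos_sequencia_baixa numeros)

-- ===== LEMMAS AND PROOFS =====

-- the max-fold never goes below its starting value
theorem pvFold_le_init (xs : List Int) (k : Int) :
    k ≤ xs.foldl (fun m x => if x > m then x else m) k := by
  induction xs generalizing k with
  | nil => exact le_rfl
  | cons b t ih =>
      simp only [List.foldl]
      exact le_trans (by split <;> omega) (ih _)

-- maxi bounds every element
theorem pvMaxi_ge (numeros : List Int) (m : Int) :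
    ∀ x ∈ numeros, x ≤ numeros.foldl (fun m x => if x > m then x else m) m := by
  induction numeros generalizing m with
  | nil => intro x hx; cases hx
  | cons a t ih =>
      intro x hx
      rcases List.mem_cons.mp hx with hx | hx
      · subst hx
        simp only [List.foldl]
        exact le_trans (by split <;> omega) (pvFold_le_init t _)
      · exact ih _ x hx

-- pvInner either keeps the state (all elements strictly above menor) ...
theorem pvInner_untouched (xs : List Int) (p : Nat) (st : Int × Option Nat)
    (h : ∀ x ∈ xs, st.1 < x) : pvInner xs p st = st := by
  induction xs generalizing p with
  | nil => rfl
  | cons a t ih =>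
      have hna : ¬ a ≤ st.1 := by have := h a (List.mem_cons_self); omega
      simp only [pvInner, if_neg hna]
      exact ih _ (fun x hx => h x (List.mem_cons_of_mem a hx))

-- ... or returns a minimum of xs together with its index
theorem pvInner_found (xs : List Int) (p : Nat) (menor : Int) (o : Option Nat)
    (h : ∃ x ∈ xs, x ≤ menor) :
    ∃ j, ∃ hj : j < xs.length,
      (pvInner xs p (menor, o)).1 = xs.get ⟨j, hj⟩ ∧
      (pvInner xs p (menor, o)).2 = some (p + j) ∧
      (∀ x ∈ xs, (pvInner xs p (menor, o)).1 ≤ x) ∧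
      (pvInner xs p (menor, o)).1 ≤ menor := by
  induction xs generalizing p menor o with
  | nil => rcases h with ⟨x, hx, _⟩; cases hx
  | cons a t ih =>
      by_cases ha : a ≤ menor
      · simp only [pvInner, if_pos ha]
        by_cases hall : ∃ x ∈ t, x ≤ a
        · rcases ih (p + 1) a (some p) hall with ⟨j, hj, h1, h2, h3, h4⟩
          refine ⟨j + 1, by simpa using Nat.succ_lt_succ hj, ?_, ?_, ?_, ?_⟩
          · simpa using h1
          · rw [h2]; congr 1; omega
          · intro x hx
            rcases List.mem_cons.mp hx with hx | hx
            · omega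
            · exact h3 x hx
          · omega
        · have hall' : ∀ x ∈ t, a < x := fun x hx => by
            by_contra hc; exact hall ⟨x, hx, by omega⟩
          rw [pvInner_untouched t (p + 1) (a, some p) (fun x hx => hall' x hx)]
          refine ⟨0, by simp, by simp, by simp, ?_, ha⟩
          intro x hx
          rcases List.mem_cons.mp hx with hx | hx
          · omega
          · have := hall' x hx; omega
      · have ht : ∃ x ∈ t, x ≤ menor := by
          rcases h with ⟨x, hx, hxm⟩
          rcases List.mem_cons.mp hx with hx | hx
          · omega
          · exact ⟨x, hx, hxm⟩
        simp only [pvInner, if_neg ha]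
        rcases ih (p + 1) menor o ht with ⟨j, hj, h1, h2, h3, h4⟩
        refine ⟨j + 1, by simpa using Nat.succ_lt_succ hj, by simpa using h1, ?_, ?_, h4⟩
        · rw [h2]; congr 1; omega
        · intro x hx
          rcases List.mem_cons.mp hx with hx | hx
          · omega
          · exact h3 x hx

-- deleting the element at index j removes exactly that occurrence
theorem pvMem_eraseIdx_iff (l : List Int) :
    ∀ (j : Nat) (hj : j < l.length) (y : Int),
      y ∈ l ↔ y = l.get ⟨j, hj⟩ ∨ y ∈ l.eraseIdx j := by
  induction l with
  | nil => intro j hj; simp at hj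
  | cons a t ih =>
      intro j hj y
      cases j with
      | zero => simp
      | succ j =>
          have hj' : j < t.length := by simpa using hj
          have := ih j hj' y
          simp only [List.eraseIdx_cons_succ, List.mem_cons, List.get_cons_succ]
          rw [this]
          tauto

-- the selection loop builds exactly the strictly increasing list of the distinct values
theorem pvOuter_spec (maxi : Int) :
    ∀ (n : Nat) (cur lista : List Int), cur.length = n →
    (∀ x ∈ cur, x ≤ maxi) →
    (∀ a ∈ lista, ∀ x ∈ cur, a ≤ x) →
    lista.Pairwise (· < ·) →
    (pvOuter maxi n (cur, lista)).2.Pairwise (· < ·) ∧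
    (∀ y, y ∈ (pvOuter maxi n (cur, lista)).2 ↔ y ∈ lista ∨ y ∈ cur) := by
  intro n
  induction n with
  | zero =>
      intro cur lista hlen _ _ hp
      have : cur = [] := List.length_eq_zero_iff.mp hlen
      subst this
      exact ⟨hp, by simp [pvOuter]⟩
  | succ n ih =>
      intro cur lista hlen hmax hle hp
      have hne : cur ≠ [] := by intro h; subst h; simp at hlen
      have hex : ∃ x ∈ cur, x ≤ maxi := by
        rcases List.exists_mem_of_ne_nil cur hne with ⟨x, hx⟩
        exact ⟨x, hx, hmax x hx⟩
      rcases pvInner_found cur 0 maxi none hex with ⟨j, hj, h1, h2, h3, h4⟩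
      simp only [Nat.zero_add] at h2
      set r := pvInner cur 0 (maxi, none) with hr
      have hmem : r.1 ∈ cur := h1 ▸ List.get_mem cur ⟨j, hj⟩
      have hstep : pvSelStep maxi (cur, lista) =
          (cur.eraseIdx j, if r.1 ∈ lista then lista else lista ++ [r.1]) := by
        simp only [pvSelStep, ← hr, h2]
      have hmemE : ∀ y, y ∈ cur ↔ y = r.1 ∨ y ∈ cur.eraseIdx j := by
        intro y; rw [h1]; exact pvMem_eraseIdx_iff cur j hj y
      have hlen' : (cur.eraseIdx j).length = n := by
        have := List.length_eraseIdx_add_one (l := cur) (i := j) hj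
        omega
      have hsubE : ∀ x ∈ cur.eraseIdx j, x ∈ cur := by
        intro x hx; exact (hmemE x).mpr (Or.inr hx)
      have hmax' : ∀ x ∈ cur.eraseIdx j, x ≤ maxi := fun x hx => hmax x (hsubE x hx)
      have hr3 : ∀ x ∈ cur.eraseIdx j, r.1 ≤ x := fun x hx => h3 x (hsubE x hx)
      by_cases hin : r.1 ∈ lista
      · have hle' : ∀ a ∈ lista, ∀ x ∈ cur.eraseIdx j, a ≤ x :=
          fun a ha x hx => hle a ha x (hsubE x hx)
        rcases ih (cur.eraseIdx j) lista hlen' hmax' hle' hp with ⟨hp2, hm2⟩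
        simp only [pvOuter, hstep, if_pos hin]
        refine ⟨hp2, fun y => ?_⟩
        rw [hm2 y]
        constructor
        · rintro (hy | hy)
          · exact Or.inl hy
          · exact Or.inr ((hmemE y).mpr (Or.inr hy))
        · rintro (hy | hy)
          · exact Or.inl hy
          · rcases (hmemE y).mp hy with hy | hy
            · subst hy; exact Or.inl hin
            · exact Or.inr hy
      · have hp' : (lista ++ [r.1]).Pairwise (· < ·) := by
          rw [List.pairwise_append]
          refine ⟨hp, List.pairwise_singleton _ _, ?_⟩
          intro a ha b hb
          have hb' : b = r.1 := by simpa using hb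
          subst hb'
          have h5 := hle a ha r.1 hmem
          have : a ≠ r.1 := fun h => hin (h ▸ ha)
          omega
        have hle' : ∀ a ∈ lista ++ [r.1], ∀ x ∈ cur.eraseIdx j, a ≤ x := by
          intro a ha x hx
          rcases List.mem_append.mp ha with ha | ha
          · exact hle a ha x (hsubE x hx)
          · have : a = r.1 := by simpa using ha
            subst this
            exact hr3 x hx
        rcases ih (cur.eraseIdx j) (lista ++ [r.1]) hlen' hmax' hle' hp' with ⟨hp2, hm2⟩
        simp only [pvOuter, hstep, if_neg hin]
        refine ⟨hp2, fun y => ?_⟩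
        rw [hm2 y]
        simp only [List.mem_append, List.mem_singleton]
        constructor
        · rintro ((hy | hy) | hy)
          · exact Or.inl hy
          · exact Or.inr ((hmemE y).mpr (Or.inl hy))
          · exact Or.inr ((hmemE y).mpr (Or.inr hy))
        · rintro (hy | hy)
          · exact Or.inl (Or.inl hy)
          · rcases (hmemE y).mp hy with hy | hy
            · exact Or.inl (Or.inr hy)
            · exact Or.inr hy

-- A's lista is the very list B sorts
theorem pvLista_eq (numeros : List Int) :
    (pvOuter (numeros.foldl (fun m x => if x > m then x else m) 0) numeros.length (numeros, [])).2
      = PySem.List.sorted (PySem.Set.ofList numeros) (fun x => x) false := by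
  set maxi := numeros.foldl (fun m x => if x > m then x else m) 0 with hmaxi
  have hmax : ∀ x ∈ numeros, x ≤ maxi := pvMaxi_ge numeros 0
  rcases pvOuter_spec maxi numeros.length numeros [] rfl hmax (by simp) (by simp)
    with ⟨hp, hm⟩
  set L := (pvOuter maxi numeros.length (numeros, [])).2 with hL
  have hnodupL : L.Nodup := hp.imp (fun h => ne_of_lt h)
  have hmemL : ∀ y, y ∈ L ↔ y ∈ PySem.Set.ofList numeros := by
    intro y
    rw [hm y, PySem.Set.mem_ofList]
    simp
  have hperm : L.Perm (PySem.Set.ofList numeros) :=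
    (List.perm_ext_iff_of_nodup hnodupL (PySem.Set.nodup_ofList numeros)).mpr hmemL
  exact (PySem.List.sorted_eq_of_perm_of_pairwise_lt _ _ (fun x => x) hperm hp).symm

-- the two run-counting loops agree on the same list
theorem pvSeq_eq_pvRun (l : List Int) (k : Int) : pvSeq l k = pvRun (l.zip l.tail) k := by
  induction l generalizing k with
  | nil => rfl
  | cons a t ih =>
      cases t with
      | nil => rfl
      | cons b rest =>
          simp only [pvSeq, List.tail_cons, List.zip_cons_cons, pvRun]
          split
          · exact ih (k + 1)
          · rfl

-- ===== VERDICT (by name: the statement is the Claim_ definition above) =====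
theorem calcula_pontos_sequencia_baixa_spec : Claim_equal_calcula_pontos_sequencia_baixa := by
  intro numeros _
  unfold Spec_calcula_pontos_sequencia_baixa
  simp only [calcula_pontos_sequencia_baixa, calcula_pontos_sequencia_baixa_alt]
  rw [pvLista_eq numeros, pvSeq_eq_pvRun]
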